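-- pv_equiv track=rewrite | github.com/Have-pig/e-manager | hbdalfhb665g.py | adadasdg
-- ===== SOURCE A (Python) =====
-- kv=["1", "2", "3", "4", "5", "6", "7", "8", "9", "0"]
--
-- def adadasdg(password):
--     letter = ""
--     number = ""
--     for i in password:
--         if str(i) not in kv:
--             letter += str(i)
--         else:
--             number += str(i)
--     return number+letter
-- ===== SOURCE B (Python) =====
-- def adadasdg(password):
--     return ''.join(sorted(password, key=lambda c: c not in "0123456789"))
-- ===== Notes on version B (the rewrite author's own statement) =====
-- stated objective: idiomatic
-- what changed: Replaces the explicit partition loop with two string accumulators by a single stable sort keyed on whether the character is a non-digit; stability yields digits first with relative order preserved.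
import Mathlib
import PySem

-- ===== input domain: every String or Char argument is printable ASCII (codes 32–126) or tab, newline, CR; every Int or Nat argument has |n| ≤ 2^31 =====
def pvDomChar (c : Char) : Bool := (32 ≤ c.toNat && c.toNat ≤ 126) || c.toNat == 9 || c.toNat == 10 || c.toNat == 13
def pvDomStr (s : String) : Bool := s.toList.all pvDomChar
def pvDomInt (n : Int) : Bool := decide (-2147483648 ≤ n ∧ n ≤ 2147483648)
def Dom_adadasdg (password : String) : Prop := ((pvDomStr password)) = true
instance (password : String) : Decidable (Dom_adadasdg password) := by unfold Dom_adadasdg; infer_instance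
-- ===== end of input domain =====

-- B replaces A's explicit two-accumulator partition loop by a single stable sort on the
-- boolean key "not a digit" (idiomatic; stability gives digits-first, order preserved).


-- ===== PORT A =====
def kv : List String := ["1", "2", "3", "4", "5", "6", "7", "8", "9", "0"]

def adadasdg (password : String) : String :=
  let r := password.toList.foldl
    (fun (acc : List Char × List Char) i =>
      if String.ofList [i] ∉ kv then (acc.1 ++ [i], acc.2) else (acc.1, acc.2 ++ [i]))
    ([], [])
  String.ofList (r.2 ++ r.1)

-- ===== PORT B =====
-- the string constant "0123456789" of B's membership test, as its character list
def digChars : List Char := "0123456789".toList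

def adadasdg_alt (password : String) : String :=
  String.ofList (PySem.List.sorted password.toList (fun c => decide (c ∉ digChars)) false)

-- ===== PRECONDITION & SPEC =====
def Spec_adadasdg (password : String) (out : String) : Prop := out = adadasdg_alt password
instance (password : String) (out : String) : Decidable (Spec_adadasdg password out) := by unfold Spec_adadasdg; infer_instance

-- ===== CLAIM (what is proved, stated in full; the proofs are below) =====
def Claim_equal_adadasdg : Prop := ∀ (password : String), Dom_adadasdg password → Spec_adadasdg password (adadasdg password)

-- ===== LEMMAS AND PROOFS =====
def pvDig (c : Char) : Bool := decide (c ∈ digChars)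

theorem pv_mem_kv (c : Char) : (String.ofList [c] ∈ kv) ↔ c ∈ digChars := by
  simp only [kv, digChars, List.mem_cons, List.not_mem_nil, or_false, ← String.toList_inj,
    String.toList_ofList]
  simp
  tauto

theorem pv_foldA (l letter number : List Char) :
    l.foldl (fun (acc : List Char × List Char) i =>
        if String.ofList [i] ∉ kv then (acc.1 ++ [i], acc.2) else (acc.1, acc.2 ++ [i]))
      (letter, number)
    = (letter ++ l.filter (fun c => !pvDig c), number ++ l.filter pvDig) := by
  induction l generalizing letter number with
  | nil => simp
  | cons c l ih =>
    by_cases h : c ∈ digChars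
    · have hk : ¬ String.ofList [c] ∉ kv := by simp [pv_mem_kv, h]
      simp only [List.foldl_cons, if_neg hk, ih, List.filter_cons]
      have hd : pvDig c = true := by simp [pvDig, h]
      simp [hd, List.append_assoc]
    · have hk : String.ofList [c] ∉ kv := by simp [pv_mem_kv, h]
      simp only [List.foldl_cons, if_pos hk, ih, List.filter_cons]
      have hd : pvDig c = false := by simp [pvDig, h]
      simp [hd, List.append_assoc]

theorem pv_insert_skip (before : Char → Char → Bool) (x : Char) (ds ns : List Char)
    (h : ∀ d ∈ ds, before x d = false) :
    PySem.List.insertBy before x (ds ++ ns) = ds ++ PySem.List.insertBy before x ns := by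
  induction ds with
  | nil => simp
  | cons d ds ih =>
    have hd : before x d = false := h d (by simp)
    simp [PySem.List.insertBy, hd, ih (fun e he => h e (by simp [he]))]

-- the comparison function of B's sort
def pvBef (a b : Char) : Bool := decide ((decide (a ∉ digChars) : Bool) < decide (b ∉ digChars))

theorem pv_bef_digit (x d : Char) (hx : pvDig x = true) (hd : pvDig d = true) :
    pvBef x d = false := by
  have h1 : (decide (x ∉ digChars) : Bool) = false := by
    simp [pvDig] at hx; simp [hx]
  have h2 : (decide (d ∉ digChars) : Bool) = false := by
    simp [pvDig] at hd; simp [hd]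
  rw [pvBef, h1, h2]; decide

theorem pv_bef_nondigit (x y : Char) (hx : pvDig x = false) : pvBef x y = false := by
  have : (decide (x ∉ digChars) : Bool) = true := by
    simp [pvDig] at hx; simp [hx]
  rw [pvBef, this]
  cases h : (decide (y ∉ digChars) : Bool) <;> decide

theorem pv_foldB (xs : List Char) : ∀ (ds ns : List Char),
    (∀ d ∈ ds, pvDig d = true) → (∀ n ∈ ns, pvDig n = false) →
    xs.foldl (fun acc x => PySem.List.insertBy pvBef x acc) (ds ++ ns)
    = (ds ++ xs.filter pvDig) ++ (ns ++ xs.filter (fun c => !pvDig c)) := by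
  induction xs with
  | nil => intro ds ns _ _; simp
  | cons x xs ih =>
    intro ds ns hds hns
    by_cases hx : pvDig x = true
    · have h1 : PySem.List.insertBy pvBef x (ds ++ ns) = (ds ++ [x]) ++ ns := by
        rw [pv_insert_skip pvBef x ds ns (fun d hd => pv_bef_digit x d hx (hds d hd)),
            List.append_assoc]
        congr 1
        cases ns with
        | nil => simp [PySem.List.insertBy]
        | cons n t =>
          have hn : pvBef x n = true := by
            have hxd : (decide (x ∉ digChars) : Bool) = false := by
              simp [pvDig] at hx; simp [hx]
            have hnd : (decide (n ∉ digChars) : Bool) = true := by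
              have := hns n (by simp); simp [pvDig] at this; simp [this]
            simp [pvBef, hxd, hnd]
          simp [PySem.List.insertBy, hn]
      simp only [List.foldl_cons, h1]
      rw [ih (ds ++ [x]) ns
          (by intro d hd; rcases List.mem_append.mp hd with h | h
              · exact hds d h
              · simp at h; simpa [h] using hx)
          hns]
      simp [hx, List.append_assoc]
    · have hx' : pvDig x = false := by simpa using hx
      have h1 : PySem.List.insertBy pvBef x (ds ++ ns) = ds ++ (ns ++ [x]) := by
        rw [PySem.List.insertBy_of_forall_not_before pvBef x (ds ++ ns)
            (fun y _ => pv_bef_nondigit x y hx')]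
        simp [List.append_assoc]
      simp only [List.foldl_cons, h1]
      rw [ih ds (ns ++ [x]) hds
          (by intro n hn; rcases List.mem_append.mp hn with h | h
              · exact hns n h
              · simp at h; simpa [h] using hx')]
      simp [hx', List.append_assoc]

theorem pv_sorted_eq (xs : List Char) :
    PySem.List.sorted xs (fun c => decide (c ∉ digChars)) false
    = xs.filter pvDig ++ xs.filter (fun c => !pvDig c) := by
  rw [PySem.List.sorted_eq_foldl_insertBy]
  have h := pv_foldB xs [] [] (by simp) (by simp)
  simp only [List.nil_append] at h
  exact h

-- ===== VERDICT (by name: the statement is the Claim_ definition above) =====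
theorem adadasdg_spec : Claim_equal_adadasdg := by
  intro password _
  unfold Spec_adadasdg adadasdg adadasdg_alt
  rw [pv_sorted_eq, pv_foldA]
  simp
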